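-- pv_equiv track=rewrite | github.com/frankyzha/mdst | validate_teacher_guided_atomcolor_local_solver.py | assignment_to_group_spans
-- ===== SOURCE A (Python) =====
-- def assignment_to_group_spans(assignment: tuple[int, ...], groups: int) -> list[list[list[int]]]:
--     spans: list[list[list[int]]] = [[] for _ in range(groups)]
--     for idx, child in enumerate(assignment):
--         group = spans[child]
--         if group and group[-1][1] + 1 >= idx:
--             group[-1][1] = idx
--         else:
--             group.append([idx, idx])
--     return spans
-- ===== SOURCE B (Python) =====
-- def assignment_to_group_spans(assignment: tuple[int, ...], groups: int) -> list[list[list[int]]]: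
--     buckets: list[list[int]] = [[] for _ in range(groups)]
--     for idx, child in enumerate(assignment):
--         buckets[child].append(idx)
--     result: list[list[list[int]]] = []
--     for idxs in buckets:
--         if not idxs:
--             result.append([])
--             continue
--         breaks = [(a, b) for a, b in zip(idxs, idxs[1:]) if a + 1 != b]
--         starts = [idxs[0]] + [b for _, b in breaks]
--         ends = [a for a, _ in breaks] + [idxs[-1]]
--         result.append([[s, e] for s, e in zip(starts, ends)])
--     return result
-- ===== Notes on version B (the rewrite author's own statement) =====
-- stated objective: alternative
-- what changed: B replaces A's single pass that grows or merges the last span in place by a two-phase algorithm: first bucket the indices per group, then rebuild each group's spans by detecting run boundaries with zip(idxs, idxs[1:]) and zipping the resulting start and end lists; Pre_ excludes only the inputs where A raises IndexError (some id outside [-groups, groups)).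
import Mathlib
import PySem

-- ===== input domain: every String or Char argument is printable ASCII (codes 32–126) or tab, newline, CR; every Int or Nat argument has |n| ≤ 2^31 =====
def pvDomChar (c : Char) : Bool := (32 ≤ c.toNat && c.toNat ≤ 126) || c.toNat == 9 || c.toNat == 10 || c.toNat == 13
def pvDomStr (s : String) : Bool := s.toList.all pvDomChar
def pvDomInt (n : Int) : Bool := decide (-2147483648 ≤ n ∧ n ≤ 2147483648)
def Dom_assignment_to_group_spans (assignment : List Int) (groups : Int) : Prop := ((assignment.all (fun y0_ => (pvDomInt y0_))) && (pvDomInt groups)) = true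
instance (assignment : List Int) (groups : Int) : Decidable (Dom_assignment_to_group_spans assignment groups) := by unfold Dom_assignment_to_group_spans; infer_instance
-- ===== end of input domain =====

-- B rebuilds the spans in two phases (bucket the indices per group, then detect run
-- boundaries per bucket) instead of A's single pass merging the last span in place;
-- alternative decomposition, same cost.

-- ===== PORT A =====
-- one iteration of A's for-loop body (spans[child] lookup, merge-or-append, write back)
def stepA (spans : List (List (List Int))) (idx : Int) (child : Int) : List (List (List Int)) :=
  match PySem.List.pyGet? spans child with
  | none => spans   -- IndexError in Python; excluded by Pre_
  | some group =>
    if group ≠ [] ∧ PySem.List.pyGetD (PySem.List.pyGetD group (-1) []) 1 0 + 1 ≥ idx then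
      PySem.List.pySetD spans child
        (PySem.List.pySetD group (-1)
          (PySem.List.pySetD (PySem.List.pyGetD group (-1) []) 1 idx))
    else
      PySem.List.pySetD spans child (group ++ [[idx, idx]])

def assignment_to_group_spans (assignment : List Int) (groups : Int) : List (List (List Int)) :=
  (PySem.List.enumerate assignment 0).foldl (fun spans p => stepA spans p.1 p.2)
    ((PySem.List.pyRange 0 groups 1).map (fun _ => []))

-- ===== PORT B =====
-- one iteration of Source B's first loop: buckets[child].append(idx)
def bucketStep (buckets : List (List Int)) (idx : Int) (child : Int) : List (List Int) :=
  match PySem.List.pyGet? buckets child with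
  | none => buckets   -- IndexError in Python; excluded by Pre_
  | some b => PySem.List.pySetD buckets child (b ++ [idx])

-- Source B's second loop body: spans of one bucket from its break points
def runsOf (idxs : List Int) : List (List Int) :=
  match idxs with
  | [] => []
  | x :: _ =>
    let breaks := (idxs.zip (PySem.List.slice idxs (some 1) none)).filter
      (fun p => decide (p.1 + 1 ≠ p.2))
    let starts := x :: breaks.map (·.2)
    let ends := breaks.map (·.1) ++ [PySem.List.pyGetD idxs (-1) 0]
    (starts.zip ends).map (fun p => [p.1, p.2])

def assignment_to_group_spans_alt (assignment : List Int) (groups : Int) : List (List (List Int)) :=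
  ((PySem.List.enumerate assignment 0).foldl (fun bs p => bucketStep bs p.1 p.2)
    ((PySem.List.pyRange 0 groups 1).map (fun _ => []))).map runsOf

-- ===== PRECONDITION & SPEC =====
-- Pre_ excludes exactly the inputs on which A raises IndexError: some id outside [-groups, groups).
def Pre_assignment_to_group_spans (assignment : List Int) (groups : Int) : Prop :=
  ∀ c ∈ assignment, -groups ≤ c ∧ c < groups
instance (assignment : List Int) (groups : Int) : Decidable (Pre_assignment_to_group_spans assignment groups) := by unfold Pre_assignment_to_group_spans; infer_instance
def pvWitness_assignment_to_group_spans : List Int × Int := ([0, 0, 1, -2, 1], 2)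

def Spec_assignment_to_group_spans (assignment : List Int) (groups : Int) (out : List (List (List Int))) : Prop := out = assignment_to_group_spans_alt assignment groups
instance (assignment : List Int) (groups : Int) (out : List (List (List Int))) : Decidable (Spec_assignment_to_group_spans assignment groups out) := by unfold Spec_assignment_to_group_spans; infer_instance

-- ===== CLAIM (what is proved, stated in full; the proofs are below) =====
def Claim_equal_assignment_to_group_spans : Prop := ∀ (assignment : List Int) (groups : Int), Dom_assignment_to_group_spans assignment groups → Pre_assignment_to_group_spans assignment groups → Spec_assignment_to_group_spans assignment groups (assignment_to_group_spans assignment groups)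

-- ===== LEMMAS AND PROOFS =====

-- pyGet? / pySetD commute with mapping a function over the list
theorem pyGet?_map {α β : Type} (f : α → β) (l : List α) (c : Int) :
    PySem.List.pyGet? (l.map f) c = (PySem.List.pyGet? l c).map f := by
  simp only [PySem.List.pyGet?, PySem.List.pyIdx?, List.length_map]
  split_ifs <;> simp

theorem pySetD_map {α β : Type} (f : α → β) (l : List α) (c : Int) (v : α) :
    PySem.List.pySetD (l.map f) c (f v) = (PySem.List.pySetD l c v).map f := by
  simp only [PySem.List.pySetD, PySem.List.pySet?, PySem.List.pyIdx?, List.length_map]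
  split_ifs <;> simp

theorem mem_pySetD {α : Type} {l : List α} {c : Int} {v b : α}
    (h : b ∈ PySem.List.pySetD l c v) : b ∈ l ∨ b = v := by
  simp only [PySem.List.pySetD, PySem.List.pySet?, PySem.List.pyIdx?] at h
  split_ifs at h
  all_goals try simp only [Option.map_some, Option.getD_some] at h
  all_goals
    first
      | exact List.mem_or_eq_of_mem_set h
      | exact Or.inl h

-- pySetD at -1 of a nonempty list replaces the last element
theorem pySetD_neg_one_append {α : Type} (xs : List α) (x v : α) :
    PySem.List.pySetD (xs ++ [x]) (-1) v = xs ++ [v] := by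
  simp [PySem.List.pySetD, PySem.List.pySet?, PySem.List.pyIdx?]

theorem pySetD_pair (s e v : Int) : PySem.List.pySetD [s, e] 1 v = [s, v] := by
  simp [PySem.List.pySetD, PySem.List.pySet?, PySem.List.pyIdx?]

theorem pyGetD_pair (s e : Int) : PySem.List.pyGetD [s, e] 1 0 = e := by simp [pysem]

theorem stepA_some (spans : List (List (List Int))) (i c : Int) (group : List (List Int))
    (h : PySem.List.pyGet? spans c = some group) :
    stepA spans i c =
      if group ≠ [] ∧ PySem.List.pyGetD (PySem.List.pyGetD group (-1) []) 1 0 + 1 ≥ i then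
        PySem.List.pySetD spans c
          (PySem.List.pySetD group (-1)
            (PySem.List.pySetD (PySem.List.pyGetD group (-1) []) 1 i))
      else
        PySem.List.pySetD spans c (group ++ [[i, i]]) := by
  unfold stepA; rw [h]

-- the adjacent-pairs list of l ++ [i]
theorem adj_snoc (a : Int) (l : List Int) (i : Int) :
    ((a :: l) ++ [i]).zip (((a :: l) ++ [i]).tail)
      = (a :: l).zip l ++ [((a :: l).getLast (by simp), i)] := by
  induction l generalizing a with
  | nil => simp
  | cons b r ih =>
    have h := ih b
    simp only [List.cons_append, List.tail_cons, List.zip_cons_cons] at h ⊢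
    rw [h]
    simp [List.getLast]

theorem zipmap_snoc (s e : List Int) (p q : Int) (h : s.length = e.length) :
    (((s ++ [p]).zip (e ++ [q])).map (fun r => [r.1, r.2]))
      = ((s.zip e).map (fun r => [r.1, r.2])) ++ [[p, q]] := by
  rw [List.zip_append h, List.map_append]
  rfl

-- unfolding of runsOf on a nonempty bucket
theorem runsOf_cons (a : Int) (l : List Int) :
    runsOf (a :: l) =
      ((a :: (((a :: l).zip l).filter (fun p => decide (p.1 + 1 ≠ p.2))).map (·.2)).zip
        ((((a :: l).zip l).filter (fun p => decide (p.1 + 1 ≠ p.2))).map (·.1)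
          ++ [PySem.List.pyGetD (a :: l) (-1) 0])).map (fun p => [p.1, p.2]) := by
  simp only [runsOf, PySem.List.slice_from_one, List.tail_cons]

-- the last span of a reconstructed bucket, with its end point abstracted
theorem runs_last (s e : List Int) (h : s.length = e.length + 1) :
    ∃ R sL, ∀ j : Int,
      ((s.zip (e ++ [j])).map (fun p => [p.1, p.2])) = R ++ [[sL, j]] := by
  have hne : s ≠ [] := by intro h0; subst h0; simp at h
  refine ⟨(s.dropLast.zip e).map (fun p => [p.1, p.2]), s.getLast hne, fun j => ?_⟩
  conv_lhs => rw [← List.dropLast_append_getLast hne]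
  rw [zipmap_snoc s.dropLast e (s.getLast hne) j (by simp [h])]

-- Source B's per-bucket reconstruction, extended by one index larger than all present
theorem runsOf_snoc (idxs : List Int) (i : Int) (hlt : ∀ x ∈ idxs, x < i) :
    runsOf (idxs ++ [i]) =
      if runsOf idxs ≠ [] ∧
          PySem.List.pyGetD (PySem.List.pyGetD (runsOf idxs) (-1) []) 1 0 + 1 ≥ i then
        PySem.List.pySetD (runsOf idxs) (-1)
          (PySem.List.pySetD (PySem.List.pyGetD (runsOf idxs) (-1) []) 1 i)
      else
        runsOf idxs ++ [[i, i]] := by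
  cases idxs with
  | nil =>
    have h1 : runsOf ([] : List Int) = [] := rfl
    rw [List.nil_append, h1, if_neg (by simp)]
    rw [runsOf_cons i []]
    simp [PySem.List.pyGetD_neg_one]
  | cons a l =>
    have hne : (a :: l) ≠ [] := by simp
    have hlast_lt : (a :: l).getLast hne < i := hlt _ (List.getLast_mem hne)
    have hcons : (a :: l) ++ [i] = a :: (l ++ [i]) := by simp
    rw [hcons, runsOf_cons a (l ++ [i]), runsOf_cons a l]
    have hadj : (a :: (l ++ [i])).zip (l ++ [i])
        = (a :: l).zip l ++ [((a :: l).getLast hne, i)] := by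
      have h := adj_snoc a l i
      simpa using h
    have hgetD : PySem.List.pyGetD (a :: (l ++ [i])) (-1) 0 = i := by
      rw [← hcons, PySem.List.pyGetD_neg_one_append_singleton]
    have hgetDlast : PySem.List.pyGetD (a :: l) (-1) 0 = (a :: l).getLast hne :=
      PySem.List.pyGetD_neg_one _ 0 hne
    rw [hadj, List.filter_append, hgetD, hgetDlast]
    set last := (a :: l).getLast hne with hlastdef
    set breaks := ((a :: l).zip l).filter (fun p => decide (p.1 + 1 ≠ p.2)) with hbr
    obtain ⟨R, sL, hRL⟩ :=
      runs_last (a :: breaks.map (·.2)) (breaks.map (·.1)) (by simp)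
    by_cases hmerge : last + 1 = i
    · have hfilter : [(last, i)].filter (fun p => decide (p.1 + 1 ≠ p.2)) = [] := by
        simp [hmerge]
      rw [hfilter, List.append_nil, hRL i, hRL last,
          PySem.List.pyGetD_neg_one_append_singleton, pyGetD_pair, pySetD_pair,
          pySetD_neg_one_append]
      rw [if_pos ⟨by simp, by omega⟩]
    · have hfilter : [(last, i)].filter (fun p => decide (p.1 + 1 ≠ p.2)) = [(last, i)] := by
        simp [hmerge]
      rw [hfilter]
      simp only [List.map_append, List.map_cons, List.map_nil]
      rw [← List.cons_append]
      rw [zipmap_snoc (a :: breaks.map (·.2)) (breaks.map (·.1) ++ [last]) i i (by simp)]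
      rw [hRL last, PySem.List.pyGetD_neg_one_append_singleton, pyGetD_pair]
      rw [if_neg (by rintro ⟨-, hge⟩; omega)]

-- main loop correspondence: A's interleaved state is runsOf of B's bucket state
theorem mainEq (rest : List Int) :
    ∀ (i : Int) (buckets : List (List Int)),
      (∀ b ∈ buckets, ∀ x ∈ b, x < i) →
      (PySem.List.enumerate rest i).foldl (fun spans p => stepA spans p.1 p.2)
          (buckets.map runsOf)
        = ((PySem.List.enumerate rest i).foldl (fun bs p => bucketStep bs p.1 p.2)
            buckets).map runsOf := by
  induction rest with
  | nil => intro i buckets _; simp [PySem.List.enumerate_nil]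
  | cons c rest' ih =>
    intro i buckets hinv
    rw [PySem.List.enumerate_cons]
    simp only [List.foldl_cons]
    have hstep : stepA (buckets.map runsOf) i c = (bucketStep buckets i c).map runsOf := by
      rcases hg : PySem.List.pyGet? buckets c with _ | idxs
      · unfold stepA bucketStep
        rw [pyGet?_map, hg]
        rfl
      · have hmem : idxs ∈ buckets := PySem.List.mem_of_pyGet?_eq_some _ hg
        have hlt : ∀ x ∈ idxs, x < i := hinv idxs hmem
        rw [stepA_some (buckets.map runsOf) i c (runsOf idxs) (by rw [pyGet?_map, hg]; rfl)]
        unfold bucketStep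
        rw [hg, ← pySetD_map, runsOf_snoc idxs i hlt]
        split_ifs <;> rfl
    rw [hstep]
    apply ih
    intro b hb x hx
    unfold bucketStep at hb
    rcases hg : PySem.List.pyGet? buckets c with _ | idxs <;> rw [hg] at hb
    · exact lt_trans (hinv b hb x hx) (by omega)
    · rcases mem_pySetD hb with hold | hnew
      · exact lt_trans (hinv b hold x hx) (by omega)
      · subst hnew
        rcases List.mem_append.mp hx with h1 | h1
        · exact lt_trans (hinv idxs (PySem.List.mem_of_pyGet?_eq_some _ hg) x h1) (by omega)
        · simp only [List.mem_singleton] at h1; omega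

-- ===== VERDICT (by name: the statement is the Claim_ definition above) =====
theorem assignment_to_group_spans_spec : Claim_equal_assignment_to_group_spans := by
  intro assignment groups _hdom _hpre
  unfold Spec_assignment_to_group_spans assignment_to_group_spans assignment_to_group_spans_alt
  have h0 : ((PySem.List.pyRange 0 groups 1).map (fun _ => ([] : List (List Int))))
      = ((PySem.List.pyRange 0 groups 1).map (fun _ => ([] : List Int))).map runsOf := by
    rw [List.map_map]; rfl
  rw [h0, mainEq assignment 0 _ ?_]
  intro b hb x hx
  have hbe : b = [] := by simp at hb; tauto
  subst hbe; simp at hx
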